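-- pv_equiv track=rewrite | github.com/takuo-h/GNN-for-OOKB | 1-starndard-setting/models/ModelA0.py | sumpooling
-- ===== SOURCE A (Python) =====
-- from collections import defaultdict
--
-- def sumpooling(xs,neighbor):
-- 	sources = defaultdict(list)
-- 	for ee in neighbor:
-- 		for i in neighbor[ee]:
-- 			sources[i].append(xs[ee])
-- 	result = []
-- 	for i,xxs in sorted(sources.items(),key=lambda x:x[0]):
-- 		if len(xxs)==1: result.append(xxs[0])
-- 		else:			result.append(sum(xxs))
-- 	return result
-- ===== SOURCE B (Python) =====
-- def sumpooling(xs, neighbor):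
--     # Sorted distinct indices, then one sum per index over all (edge, neighbor-entry)
--     # occurrences -- no dict grouping at all.
--     idx = sorted({i for nbr in neighbor.values() for i in nbr})
--     return [sum(xs[ee] for ee, nbr in neighbor.items() for j in nbr if j == i)
--             for i in idx]
-- ===== Notes on version B (the rewrite author's own statement) =====
-- stated objective: alternative
-- what changed: Replaces the defaultdict hash-grouping pass with a sorted set of the distinct neighbor indices followed by one direct sum per index over the flattened (edge, neighbor-entry) occurrences, eliminating the intermediate dict of value lists.
import Mathlib
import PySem

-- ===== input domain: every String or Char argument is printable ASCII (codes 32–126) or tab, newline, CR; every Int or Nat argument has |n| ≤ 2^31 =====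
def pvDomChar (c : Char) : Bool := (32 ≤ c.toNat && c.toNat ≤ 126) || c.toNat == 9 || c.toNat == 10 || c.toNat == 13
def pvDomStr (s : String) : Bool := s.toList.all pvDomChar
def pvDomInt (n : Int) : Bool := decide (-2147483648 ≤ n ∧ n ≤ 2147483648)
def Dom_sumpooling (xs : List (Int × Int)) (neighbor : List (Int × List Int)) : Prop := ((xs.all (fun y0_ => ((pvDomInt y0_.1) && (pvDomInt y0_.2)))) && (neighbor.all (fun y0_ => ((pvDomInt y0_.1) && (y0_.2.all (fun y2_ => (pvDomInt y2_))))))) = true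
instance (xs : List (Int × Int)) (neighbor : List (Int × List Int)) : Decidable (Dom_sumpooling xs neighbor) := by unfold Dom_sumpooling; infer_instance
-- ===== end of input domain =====

-- B replaces A's defaultdict grouping with "sorted distinct indices, then one sum per
-- index over the flattened (edge, neighbor-entry) occurrences" (objective: alternative).

-- ===== PORT A =====
-- sources = defaultdict(list); for ee in neighbor: for i in neighbor[ee]: sources[i].append(xs[ee]);
-- then for i,xxs in sorted(sources.items(), key=fst): append xxs[0] if len(xxs)==1 else sum(xxs).
-- xs[ee] is ported as getD with default 0 (Pre_sumpooling excludes the KeyError inputs, where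
-- the default is never reached), and xxs[0] under len(xxs)==1 as headD 0 (exact: a singleton).
def sumpooling (xs : List (Int × Int)) (neighbor : List (Int × List Int)) : List Int :=
  let sources : PySem.Dict Int (List Int) :=
    neighbor.foldl (fun d p =>
      p.2.foldl (fun d i => d.modify i [] (· ++ [(PySem.Dict.mk xs).getD p.1 0])) d)
      PySem.Dict.empty
  (PySem.List.sorted sources.items (fun x => x.1) false).foldl
    (fun acc p => if p.2.length == 1 then acc ++ [p.2.headD 0] else acc ++ [p.2.sum]) []

-- ===== PORT B =====
-- idx = sorted({i for nbr in neighbor.values() for i in nbr})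
-- return [sum(xs[ee] for ee, nbr in neighbor.items() for j in nbr if j == i) for i in idx]
def sumpooling_alt (xs : List (Int × Int)) (neighbor : List (Int × List Int)) : List Int :=
  let idx : List Int :=
    PySem.List.sorted (PySem.Set.ofList (neighbor.flatMap (fun p => p.2))) (fun i => i) false
  idx.map (fun i =>
    (neighbor.flatMap (fun p =>
      (p.2.filter (fun j => j == i)).map (fun _ => (PySem.Dict.mk xs).getD p.1 0))).sum)

-- ===== PRECONDITION & SPEC =====
-- Pre_ excludes exactly the inputs where Python A raises KeyError: an edge ee with a
-- nonempty neighbor list whose key ee is absent from xs.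
def Pre_sumpooling (xs : List (Int × Int)) (neighbor : List (Int × List Int)) : Prop :=
  ∀ p ∈ neighbor, p.2 ≠ [] → (PySem.Dict.mk xs).contains p.1 = true
instance (xs : List (Int × Int)) (neighbor : List (Int × List Int)) : Decidable (Pre_sumpooling xs neighbor) := by unfold Pre_sumpooling; infer_instance

def pvWitness_sumpooling : (List (Int × Int)) × (List (Int × List Int)) :=
  ([(1, 5), (2, -3)], [(1, [0, 2]), (2, [0])])

def Spec_sumpooling (xs : List (Int × Int)) (neighbor : List (Int × List Int)) (out : List Int) : Prop := out = sumpooling_alt xs neighbor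
instance (xs : List (Int × Int)) (neighbor : List (Int × List Int)) (out : List Int) : Decidable (Spec_sumpooling xs neighbor out) := by unfold Spec_sumpooling; infer_instance

-- ===== CLAIM (what is proved, stated in full; the proofs are below) =====
def Claim_equal_sumpooling : Prop := ∀ (xs : List (Int × Int)) (neighbor : List (Int × List Int)), Dom_sumpooling xs neighbor → Pre_sumpooling xs neighbor → Spec_sumpooling xs neighbor (sumpooling xs neighbor)

-- ===== LEMMAS AND PROOFS =====

-- the flattened (index, value) occurrence list both programs range over
def pvPairs (xs : List (Int × Int)) (neighbor : List (Int × List Int)) : List (Int × Int) :=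
  neighbor.flatMap (fun p => p.2.map (fun i => (i, (PySem.Dict.mk xs).getD p.1 0)))

-- A's double loop is the single modify-loop over the flattened pairs
theorem pv_sources_eq (xs : List (Int × Int)) (neighbor : List (Int × List Int)) :
    neighbor.foldl (fun d p =>
      p.2.foldl (fun d i => d.modify i [] (· ++ [(PySem.Dict.mk xs).getD p.1 0])) d)
      PySem.Dict.empty
    = (pvPairs xs neighbor).foldl (fun d q => d.modify q.1 [] (· ++ [q.2])) PySem.Dict.empty := by
  rw [pvPairs, List.foldl_flatMap]
  simp [List.foldl_map]

-- "xxs[0] if len(xxs)==1 else sum(xxs)" is just sum for Int lists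
theorem pv_pick_eq_sum (l : List Int) :
    (if l.length == 1 then l.headD 0 else l.sum) = l.sum := by
  cases l with
  | nil => simp
  | cons a t => cases t <;> simp

theorem sumpooling_eq_alt (xs : List (Int × Int)) (neighbor : List (Int × List Int)) :
    sumpooling xs neighbor = sumpooling_alt xs neighbor := by
  unfold sumpooling sumpooling_alt
  dsimp only
  rw [pv_sources_eq]
  set src : PySem.Dict Int (List Int) :=
    (pvPairs xs neighbor).foldl (fun d q => d.modify q.1 [] (· ++ [q.2])) PySem.Dict.empty with hsrc
  have hkeys : src.keys = PySem.Set.ofList (neighbor.flatMap (fun p => p.2)) := by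
    have := PySem.Dict.keys_foldl_modify_key (pvPairs xs neighbor) (fun q => q.1) []
      (fun _ q => (· ++ [q.2])) PySem.Dict.empty
    rw [hsrc]
    simp only at this ⊢
    rw [this]
    have hm : (pvPairs xs neighbor).map (fun q => q.1) = neighbor.flatMap (fun p => p.2) := by
      simp [pvPairs, List.map_flatMap, Function.comp_def]
    simp [hm, PySem.Set.update_nil_left]
  have hnd : src.keys.Nodup := by
    rw [hkeys]; exact PySem.Set.nodup_ofList _
  have hval : ∀ i : Int, src.getD i [] =
      ((pvPairs xs neighbor).filter (fun q => q.1 == i)).map (fun q => q.2) := by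
    intro i
    rw [hsrc]
    simpa using PySem.Dict.getD_foldl_modify_append (pvPairs xs neighbor) PySem.Dict.empty i
  set sk : List Int := PySem.List.sorted src.keys (fun i => i) false with hsk
  have hskperm : sk.Perm src.keys := PySem.List.sorted_perm _ _ _
  have hsklt : sk.Pairwise (· < ·) := by
    have h1 : sk.Pairwise (· ≤ ·) := PySem.List.sorted_pairwise src.keys (fun i => i)
    have h2 : sk.Nodup := hskperm.symm.nodup hnd
    exact (h1.and h2).imp (fun ⟨a, b⟩ => lt_of_le_of_ne a b)
  have hitems : PySem.List.sorted src.items (fun x => x.1) false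
      = sk.map (fun k => (k, src.getD k [])) := by
    apply PySem.List.sorted_eq_of_perm_of_pairwise_lt
    · rw [PySem.Dict.items_eq_map_keys src hnd []]
      exact hskperm.map _
    · exact (List.pairwise_map).mpr hsklt
  rw [hitems]
  have hfold : ∀ (l : List (Int × List Int)),
      l.foldl (fun acc p => if p.2.length == 1 then acc ++ [p.2.headD 0] else acc ++ [p.2.sum]) []
      = l.map (fun p => if p.2.length == 1 then p.2.headD 0 else p.2.sum) := by
    intro l
    have : (fun (acc : List Int) (p : Int × List Int) =>
        if p.2.length == 1 then acc ++ [p.2.headD 0] else acc ++ [p.2.sum])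
        = (fun acc p => acc ++ [if p.2.length == 1 then p.2.headD 0 else p.2.sum]) := by
      funext acc p; split <;> rfl
    rw [this]
    simpa using PySem.List.foldl_append_singleton_eq_map
      (fun p : Int × List Int => if p.2.length == 1 then p.2.headD 0 else p.2.sum) l []
  rw [hfold, List.map_map]
  rw [← hkeys, ← hsk]
  apply List.map_congr_left
  intro k _
  simp only [Function.comp]
  rw [pv_pick_eq_sum, hval k]
  congr 1
  simp [pvPairs, List.filter_flatMap, List.map_flatMap, List.filter_map, Function.comp_def]

-- ===== VERDICT (by name: the statement is the Claim_ definition above) =====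
theorem sumpooling_spec : Claim_equal_sumpooling := by
  intro xs neighbor _ _
  exact sumpooling_eq_alt xs neighbor
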